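-- pv_equiv track=rewrite | github.com/pvestal/tower-echo-brain | directors/ethics_director.py | _get_fairness_recommendations
-- ===== SOURCE A (Python) =====
-- from typing import Dict, List, Any, Optional, Tuple, Set
--
-- def _get_fairness_recommendations(fairness_issues: List[Dict[str, Any]]) -> List[str]:
--     """Get fairness improvement recommendations."""
--     recommendations = []
--     issue_types = {issue.get("type") for issue in fairness_issues}
--
--     if "disparate_treatment" in issue_types:
--         recommendations.append("Ensure equal treatment across all user groups")
--
--     if "disparate_impact" in issue_types:
--         recommendations.append("Monitor for disparate impact and adjust thresholds")
--
--     if "lack_of_transparency" in issue_types: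
--         recommendations.append("Implement explainable AI techniques")
--
--     return recommendations
-- ===== SOURCE B (Python) =====
-- _FAIR_BIT = {
--     "disparate_treatment": 1,
--     "disparate_impact": 2,
--     "lack_of_transparency": 4,
-- }
--
-- _R1 = "Ensure equal treatment across all user groups"
-- _R2 = "Monitor for disparate impact and adjust thresholds"
-- _R3 = "Implement explainable AI techniques"
--
-- _FAIR_ANSWERS = [
--     [], [_R1], [_R2], [_R1, _R2],
--     [_R3], [_R1, _R3], [_R2, _R3], [_R1, _R2, _R3],
-- ]
--
--
-- def _get_fairness_recommendations(fairness_issues):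
--     """Get fairness improvement recommendations (bitmask accumulator + answer table)."""
--     mask = 0
--     for issue in fairness_issues:
--         mask |= _FAIR_BIT.get(issue.get("type"), 0)
--     return list(_FAIR_ANSWERS[mask])
-- ===== Notes on version B (the rewrite author's own statement) =====
-- stated objective: alternative
-- what changed: Replaced A's build-a-set-of-types-then-three-membership-branches by a single left-to-right pass that ORs a per-type bit into an integer mask, followed by an indexed lookup of the final answer in a precomputed 8-entry table; no set and no conditional appends.
import Mathlib
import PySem

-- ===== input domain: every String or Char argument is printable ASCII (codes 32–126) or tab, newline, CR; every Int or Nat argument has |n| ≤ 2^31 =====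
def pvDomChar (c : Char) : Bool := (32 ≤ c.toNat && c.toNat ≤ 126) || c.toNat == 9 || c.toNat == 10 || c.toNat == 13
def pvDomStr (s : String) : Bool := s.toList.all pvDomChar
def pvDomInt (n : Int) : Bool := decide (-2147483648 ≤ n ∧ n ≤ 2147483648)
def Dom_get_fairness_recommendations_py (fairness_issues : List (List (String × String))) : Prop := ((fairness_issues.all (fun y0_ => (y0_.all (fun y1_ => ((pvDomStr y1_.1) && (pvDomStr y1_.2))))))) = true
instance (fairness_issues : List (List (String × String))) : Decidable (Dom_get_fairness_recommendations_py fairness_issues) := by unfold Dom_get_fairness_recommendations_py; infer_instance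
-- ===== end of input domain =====

-- B replaces A's set-of-types-plus-three-if-branches by one pass accumulating a bitmask of seen issue types and an indexed lookup in a precomputed 8-entry answer table (alternative decomposition, same cost).


-- ===== PORT A =====
def get_fairness_recommendations_py (fairness_issues : List (List (String × String))) : List String :=
  let recommendations : List String := []
  let issue_types : PySem.Set (Option String) :=
    PySem.Set.ofList (fairness_issues.map (fun issue => (PySem.Dict.mk issue).get? "type"))
  let recommendations := if PySem.Set.contains issue_types (some "disparate_treatment")
    then recommendations ++ ["Ensure equal treatment across all user groups"] else recommendations
  let recommendations := if PySem.Set.contains issue_types (some "disparate_impact")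
    then recommendations ++ ["Monitor for disparate impact and adjust thresholds"] else recommendations
  let recommendations := if PySem.Set.contains issue_types (some "lack_of_transparency")
    then recommendations ++ ["Implement explainable AI techniques"] else recommendations
  recommendations

-- ===== PORT B =====
def pvFairBitDict : PySem.Dict String Nat :=
  PySem.Dict.mk [("disparate_treatment", 1), ("disparate_impact", 2), ("lack_of_transparency", 4)]

def pvR1 : String := "Ensure equal treatment across all user groups"
def pvR2 : String := "Monitor for disparate impact and adjust thresholds"
def pvR3 : String := "Implement explainable AI techniques"

def pvFairAnswers : List (List String) :=
  [[], [pvR1], [pvR2], [pvR1, pvR2], [pvR3], [pvR1, pvR3], [pvR2, pvR3], [pvR1, pvR2, pvR3]]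

-- _FAIR_BIT.get(issue.get("type"), 0): a None key never equals a str key of the dict, so it takes the default 0 — exact.
def pvFairBitOf (issue : List (String × String)) : Nat :=
  match (PySem.Dict.mk issue).get? "type" with
  | none => 0
  | some t => pvFairBitDict.getD t 0

def get_fairness_recommendations_py_alt (fairness_issues : List (List (String × String))) : List String :=
  let mask := fairness_issues.foldl (fun m issue => m ||| pvFairBitOf issue) 0
  -- _FAIR_ANSWERS[mask]: the mask is always < 8, so Python's plain index never raises; getD is exact here
  pvFairAnswers.getD mask []

-- ===== PRECONDITION & SPEC =====
def Spec_get_fairness_recommendations_py (fairness_issues : List (List (String × String))) (out : List String) : Prop := out = get_fairness_recommendations_py_alt fairness_issues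
instance (fairness_issues : List (List (String × String))) (out : List String) : Decidable (Spec_get_fairness_recommendations_py fairness_issues out) := by unfold Spec_get_fairness_recommendations_py; infer_instance

-- ===== CLAIM (what is proved, stated in full; the proofs are below) =====
def Claim_equal_get_fairness_recommendations_py : Prop := ∀ (fairness_issues : List (List (String × String))), Dom_get_fairness_recommendations_py fairness_issues → Spec_get_fairness_recommendations_py fairness_issues (get_fairness_recommendations_py fairness_issues)

-- ===== LEMMAS AND PROOFS =====

-- the OR-fold over any accumulator equals the accumulator ORed with the fold from 0
theorem pvFoldl_or_hoist {α : Type} (f : α → Nat) (l : List α) (m : Nat) :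
    l.foldl (fun a x => a ||| f x) m = m ||| l.foldl (fun a x => a ||| f x) 0 := by
  induction l generalizing m with
  | nil => simp
  | cons x l ih =>
    simp only [List.foldl_cons]
    rw [ih (m ||| f x), ih (0 ||| f x), Nat.zero_or, Nat.or_assoc]

-- the per-issue bit, written as three disjoint-bit tests
theorem pvFairBitOf_eq (issue : List (String × String)) :
    pvFairBitOf issue =
      (if (PySem.Dict.mk issue).get? "type" == some "disparate_treatment" then 1 else 0) |||
      (if (PySem.Dict.mk issue).get? "type" == some "disparate_impact" then 2 else 0) |||
      (if (PySem.Dict.mk issue).get? "type" == some "lack_of_transparency" then 4 else 0) := by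
  unfold pvFairBitOf pvFairBitDict
  cases h : (PySem.Dict.mk issue).get? "type" with
  | none => simp
  | some t =>
    by_cases h1 : t = "disparate_treatment" <;> by_cases h2 : t = "disparate_impact" <;>
      by_cases h3 : t = "lack_of_transparency"
    all_goals first
      | (subst_vars; decide)
      | (have e1 : ("disparate_treatment" == t) = false := beq_eq_false_iff_ne.mpr (Ne.symm h1)
         have e2 : ("disparate_impact" == t) = false := beq_eq_false_iff_ne.mpr (Ne.symm h2)
         have e3 : ("lack_of_transparency" == t) = false := beq_eq_false_iff_ne.mpr (Ne.symm h3)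
         simp [PySem.Dict.getD, PySem.Dict.get?, List.find?, e1, e2, e3, beq_iff_eq, h1, h2, h3])

-- ORing two disjoint-bit masks merges the flags
theorem pvOrMask (p1 p2 p3 a b c : Bool) :
    (((if p1 then 1 else 0 : Nat) ||| (if p2 then 2 else 0)) ||| (if p3 then 4 else 0)) |||
      (((if a then 1 else 0) ||| (if b then 2 else 0)) ||| (if c then 4 else 0)) =
    ((if p1 || a then 1 else 0) ||| (if p2 || b then 2 else 0)) ||| (if p3 || c then 4 else 0) := by
  cases p1 <;> cases p2 <;> cases p3 <;> cases a <;> cases b <;> cases c <;> simp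

-- the final mask as a function of the three membership booleans
theorem pvMask_eq (l : List (List (String × String))) :
    l.foldl (fun m issue => m ||| pvFairBitOf issue) 0 =
      (if l.any (fun issue => (PySem.Dict.mk issue).get? "type" == some "disparate_treatment") then 1 else 0) |||
      (if l.any (fun issue => (PySem.Dict.mk issue).get? "type" == some "disparate_impact") then 2 else 0) |||
      (if l.any (fun issue => (PySem.Dict.mk issue).get? "type" == some "lack_of_transparency") then 4 else 0) := by
  induction l with
  | nil => simp
  | cons x l ih =>
    simp only [List.foldl_cons, List.any_cons, Nat.zero_or]
    rw [pvFoldl_or_hoist, ih, pvFairBitOf_eq]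
    exact pvOrMask _ _ _ _ _ _

-- A's membership test in the deduplicated set of issue types is an any() scan over the issues
theorem pvContains_eq_any (fairness_issues : List (List (String × String))) (t : String) :
    PySem.Set.contains
      (PySem.Set.ofList (fairness_issues.map (fun issue => (PySem.Dict.mk issue).get? "type")))
      (some t)
    = fairness_issues.any (fun issue => (PySem.Dict.mk issue).get? "type" == some t) := by
  simp only [pysem]
  rw [Bool.eq_iff_iff]
  simp [List.any_eq_true]

-- ===== VERDICT (by name: the statement is the Claim_ definition above) =====
theorem get_fairness_recommendations_py_spec : Claim_equal_get_fairness_recommendations_py := by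
  intro fairness_issues _
  unfold Spec_get_fairness_recommendations_py
  unfold get_fairness_recommendations_py get_fairness_recommendations_py_alt
  simp only [pvContains_eq_any, pvMask_eq]
  cases fairness_issues.any (fun issue => (PySem.Dict.mk issue).get? "type" == some "disparate_treatment") <;>
    cases fairness_issues.any (fun issue => (PySem.Dict.mk issue).get? "type" == some "disparate_impact") <;>
      cases fairness_issues.any (fun issue => (PySem.Dict.mk issue).get? "type" == some "lack_of_transparency") <;>
        simp [pvFairAnswers, pvR1, pvR2, pvR3]
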